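-- pv_equiv track=rewrite | github.com/adinashby-vanier-college/programming-in-science-assignment-2-LailaPersico | Assignment2.py | max_two_in_list
-- ===== SOURCE A (Python) =====
-- def max_two_in_list(numbers):
--     if not numbers:
--         return (None, None)
--     if len(numbers) == 1:
--         return (numbers[0], None)
--
--     max1 = numbers[0]
--     max2 = None
--
--     for n in numbers[1:]:
--         if n > max1:
--             max2 = max1
--             max1 = n
--         elif n < max1:
--             if max2 is None or n > max2:
--                 max2 = n
--
--     return (max1, max2)
-- ===== SOURCE B (Python) =====
-- def max_two_in_list(numbers):
--     if not numbers:
--         return (None, None)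
--     m1 = max(numbers)
--     lower = [n for n in numbers if n < m1]
--     m2 = max(lower) if lower else None
--     return (m1, m2)
-- ===== Notes on version B (the rewrite author's own statement) =====
-- stated objective: simpler
-- what changed: Replaces the single interleaved two-variable state-machine pass (with its three-way branch and None bookkeeping) by two plain reductions: m1 = max(numbers), then m2 = max of the elements strictly below m1 (None if that subset is empty).
import Mathlib
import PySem

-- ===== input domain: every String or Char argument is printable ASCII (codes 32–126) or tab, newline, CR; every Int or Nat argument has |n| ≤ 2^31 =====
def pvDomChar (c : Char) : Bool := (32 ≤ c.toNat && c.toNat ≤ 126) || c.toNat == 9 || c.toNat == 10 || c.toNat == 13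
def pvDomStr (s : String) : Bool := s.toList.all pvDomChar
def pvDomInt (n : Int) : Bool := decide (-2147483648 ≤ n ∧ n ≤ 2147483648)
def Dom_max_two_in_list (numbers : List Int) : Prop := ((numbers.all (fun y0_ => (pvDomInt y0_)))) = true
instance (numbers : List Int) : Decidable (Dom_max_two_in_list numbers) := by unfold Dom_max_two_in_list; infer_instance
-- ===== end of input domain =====

-- B replaces A's interleaved two-variable single pass by two separate reductions
-- (max of the list, then max of the strictly-smaller elements); objective: simpler.

-- ===== PORT A =====
-- loop body of A's 'for n in numbers[1:]' over the state (max1, max2)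
def pvStepA (s : Int × Option Int) (n : Int) : Int × Option Int :=
  if n > s.1 then (n, some s.1)
  else if n < s.1 then
    (match s.2 with
     | none => (s.1, some n)
     | some m2 => if n > m2 then (s.1, some n) else s)
  else s

def max_two_in_list (numbers : List Int) : Option Int × Option Int :=
  match numbers with
  | [] => (none, none)
  | x :: xs =>
    if xs = [] then (some x, none)
    else
      -- numbers[1:] is xs; max1 starts at numbers[0] = x, max2 at None
      let st := xs.foldl pvStepA (x, none)
      (some st.1, st.2)

-- ===== PORT B =====
def max_two_in_list_alt (numbers : List Int) : Option Int × Option Int :=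
  match PySem.List.max? numbers (fun y => y) with
  | none => (none, none)                 -- 'if not numbers' guard
  | some m1 =>
    let lower := numbers.filter (fun n => n < m1)
    (some m1, PySem.List.max? lower (fun y => y))

-- ===== PRECONDITION & SPEC =====
def Spec_max_two_in_list (numbers : List Int) (out : Option Int × Option Int) : Prop := out = max_two_in_list_alt numbers
instance (numbers : List Int) (out : Option Int × Option Int) : Decidable (Spec_max_two_in_list numbers out) := by unfold Spec_max_two_in_list; infer_instance

-- ===== CLAIM (what is proved, stated in full; the proofs are below) =====
def Claim_equal_max_two_in_list : Prop := ∀ (numbers : List Int), Dom_max_two_in_list numbers → Spec_max_two_in_list numbers (max_two_in_list numbers)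

-- ===== LEMMAS AND PROOFS =====

-- merge of two optional maxima
def pvOmax : Option Int → Option Int → Option Int
  | none, b => b
  | some a, none => some a
  | some a, some b => some (max a b)

theorem pvOmax_none_right (o : Option Int) : pvOmax o none = o := by
  cases o <;> rfl

theorem pvMax?_nil : PySem.List.max? ([] : List Int) (fun y => y) = none := by
  simp [PySem.List.max?_eq_none_iff]

theorem pvOmax_some_left (a b : Int) (z : Option Int) :
    pvOmax (some a) (pvOmax (some b) z) = pvOmax (some (max a b)) z := by
  cases z <;> simp [pvOmax, max_assoc]

theorem foldl_max_assoc (t : List Int) (a b : Int) :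
    t.foldl max (max a b) = max a (t.foldl max b) := by
  induction t generalizing b with
  | nil => rfl
  | cons c t ih => simp only [List.foldl, max_assoc]; exact ih (max b c)

theorem max?_cons_omax (n : Int) (t : List Int) :
    PySem.List.max? (n :: t) (fun y => y) = pvOmax (some n) (PySem.List.max? t (fun y => y)) := by
  cases t with
  | nil => rw [PySem.List.max?_id_cons, pvMax?_nil]; simp [pvOmax]
  | cons h t' =>
    rw [PySem.List.max?_id_cons, PySem.List.max?_id_cons]
    simp only [List.foldl, pvOmax]
    rw [foldl_max_assoc]

-- filtered max? of a cons
theorem maxF_cons (M n : Int) (t : List Int) :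
    PySem.List.max? ((n :: t).filter (fun y => y < M)) (fun y => y)
      = if n < M then pvOmax (some n) (PySem.List.max? (t.filter (fun y => y < M)) (fun y => y))
        else PySem.List.max? (t.filter (fun y => y < M)) (fun y => y) := by
  by_cases h : n < M
  · rw [if_pos h, List.filter_cons_of_pos (by simpa using h), max?_cons_omax]
  · rw [if_neg h, List.filter_cons_of_neg (by simpa using h)]

-- the loop invariant: A's fold computes the running max and the merged below-max maximum
theorem pvOmax_none_left (z : Option Int) : pvOmax none z = z := rfl

theorem pvOmax_left_eq (u v : Int) (F : Option Int) (h : u = v) :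
    pvOmax (some u) F = pvOmax (some v) F := by rw [h]

theorem fold_char (xs : List Int) (a : Int) (o : Option Int)
    (ho : ∀ m, o = some m → m < a) :
    xs.foldl pvStepA (a, o) =
      (xs.foldl max a,
       pvOmax (if a < xs.foldl max a then some a else o)
         (PySem.List.max? (xs.filter (fun y => y < xs.foldl max a)) (fun y => y))) := by
  induction xs generalizing a o with
  | nil =>
    simp only [List.foldl, List.filter_nil, pvMax?_nil, pvOmax_none_right, lt_self_iff_false,
      if_false]
  | cons n xs ih =>
    have hM := PySem.List.le_foldl_max xs (max a n)
    have haM : a ≤ xs.foldl max (max a n) := le_trans (le_max_left a n) hM.1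
    have hnM : n ≤ xs.foldl max (max a n) := le_trans (le_max_right a n) hM.1
    rw [List.foldl_cons, List.foldl_cons, maxF_cons]
    rcases lt_trichotomy n a with hlt | heq | hgt
    · -- n < a : max a n = a, running max unchanged; n joins the below-max pool
      have hmax : max a n = a := max_eq_left (le_of_lt hlt)
      rw [hmax] at hM haM hnM ⊢
      have hnM' : n < xs.foldl max a := lt_of_lt_of_le hlt haM
      rw [if_pos hnM']
      cases o with
      | none =>
        have hstep : pvStepA (a, (none : Option Int)) n = (a, some n) := by
          simp [pvStepA, not_lt.mpr (le_of_lt hlt), hlt]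
        rw [hstep, ih a (some n) (by intro m hm; cases hm; exact hlt)]
        refine congrArg (Prod.mk _) ?_
        split_ifs with h <;> simp only [pvOmax_some_left, pvOmax_none_left] <;>
          first
          | rfl
          | exact pvOmax_left_eq _ _ _ (by omega)
      | some m2 =>
        have hm2 : m2 < a := ho m2 rfl
        by_cases hnm2 : n > m2
        · have hstep : pvStepA (a, some m2) n = (a, some n) := by
            simp [pvStepA, not_lt.mpr (le_of_lt hlt), hlt, hnm2]
          rw [hstep, ih a (some n) (by intro m hm; cases hm; exact hlt)]
          refine congrArg (Prod.mk _) ?_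
          split_ifs with h <;> simp only [pvOmax_some_left, pvOmax_none_left] <;>
            first
            | rfl
            | exact pvOmax_left_eq _ _ _ (by omega)
        · have hstep : pvStepA (a, some m2) n = (a, some m2) := by
            simp [pvStepA, not_lt.mpr (le_of_lt hlt), hlt, hnm2]
          rw [hstep, ih a (some m2) ho]
          refine congrArg (Prod.mk _) ?_
          split_ifs with h <;> simp only [pvOmax_some_left, pvOmax_none_left] <;>
            first
            | rfl
            | exact pvOmax_left_eq _ _ _ (by omega)
    · -- n = a : A's state is unchanged and so is the specification
      subst heq
      rw [max_self] at hM haM hnM ⊢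
      have hstep : pvStepA (n, o) n = (n, o) := by
        simp [pvStepA]
      rw [hstep, ih n o ho]
      refine congrArg (Prod.mk _) ?_
      split_ifs with h <;> simp only [pvOmax_some_left, pvOmax_none_left] <;>
        first
        | rfl
        | exact pvOmax_left_eq _ _ _ (by omega)
    · -- a < n : the bump branch; the old max a falls into the below-max pool
      have hmax : max a n = n := max_eq_right (le_of_lt hgt)
      rw [hmax] at hM haM hnM ⊢
      have haM' : a < xs.foldl max n := lt_of_lt_of_le hgt hM.1
      have hstep : pvStepA (a, o) n = (n, some a) := by
        simp [pvStepA, hgt]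
      rw [hstep, ih n (some a) (by intro m hm; cases hm; exact hgt), if_pos haM']
      refine congrArg (Prod.mk _) ?_
      split_ifs with h <;> simp only [pvOmax_some_left, pvOmax_none_left] <;>
        first
        | rfl
        | exact pvOmax_left_eq _ _ _ (by omega)

-- ===== VERDICT (by name: the statement is the Claim_ definition above) =====
theorem max_two_in_list_spec : Claim_equal_max_two_in_list := by
  intro numbers _
  unfold Spec_max_two_in_list max_two_in_list max_two_in_list_alt
  cases numbers with
  | nil => rfl
  | cons x xs =>
    rw [PySem.List.max?_id_cons]
    cases xs with
    | nil => simp [PySem.List.max?]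
    | cons h t =>
      simp only [if_neg (List.cons_ne_nil h t)]
      rw [fold_char (h :: t) x none (by intro m hm; cases hm),
          maxF_cons ((h :: t).foldl max x) x (h :: t)]
      by_cases hxM : x < (h :: t).foldl max x
      · rw [if_pos hxM, if_pos hxM]
      · rw [if_neg hxM, if_neg hxM]; simp [pvOmax]
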